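-- pv_equiv track=rewrite | github.com/picasso250/skills | edit-env-with-tk/scripts/update_env_with_tk.py | upsert_env_lines
-- ===== SOURCE A (Python) =====
-- def env_quote(value: str) -> str:
--     escaped = (
--         value.replace("\\", "\\\\")
--         .replace('"', '\\"')
--         .replace("\n", "\\n")
--         .replace("\r", "\\r")
--     )
--     return f'"{escaped}"'
--
-- def upsert_env_lines(lines: list[str], updates: dict[str, str]) -> list[str]:
--     remaining = dict(updates)
--     output: list[str] = []
--
--     for line in lines:
--         stripped = line.lstrip()
--         replaced = False
--         for key in list(remaining):
--             if stripped.startswith(f"{key}="):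
--                 indent_len = len(line) - len(stripped)
--                 indent = line[:indent_len]
--                 output.append(f"{indent}{key}={env_quote(remaining.pop(key))}\n")
--                 replaced = True
--                 break
--         if not replaced:
--             output.append(line)
--
--     if output and not output[-1].endswith("\n"):
--         output[-1] += "\n"
--
--     for key, value in remaining.items():
--         output.append(f"{key}={env_quote(value)}\n")
--
--     return output
-- ===== SOURCE B (Python) =====
-- def env_quote(value: str) -> str:
--     escaped = (
--         value.replace("\\", "\\\\")
--         .replace('"', '\\"')
--         .replace("\n", "\\n")
--         .replace("\r", "\\r")
--     )
--     return f'"{escaped}"'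
--
-- def upsert_env_lines(lines: list[str], updates: dict[str, str]) -> list[str]:
--     # One pass: parse the name before the first '=' and look it up directly,
--     # instead of scanning a shrinking dict of keys for every line.
--     seen = set()
--     out: list[str] = []
--     for line in lines:
--         stripped = line.lstrip()
--         i = stripped.find("=")
--         if i >= 0:
--             name = stripped[:i]
--             if name in updates and name not in seen:
--                 seen.add(name)
--                 indent = line[:len(line) - len(stripped)]
--                 out.append(f"{indent}{name}={env_quote(updates[name])}\n")
--                 continue
--         out.append(line)
--     if out and not out[-1].endswith("\n"):
--         out[-1] += "\n"
--     for key, value in updates.items():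
--         if key not in seen:
--             out.append(f"{key}={env_quote(value)}\n")
--     return out
-- ===== Notes on version B (the rewrite author's own statement) =====
-- stated objective: faster
-- what changed: A scans the dict of still-pending keys for every line (testing startswith per key) and pops matches; B parses each line's variable name before its first '=' once and does a single direct dict lookup plus a 'seen' set, removing the inner scan over keys.
import Mathlib
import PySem

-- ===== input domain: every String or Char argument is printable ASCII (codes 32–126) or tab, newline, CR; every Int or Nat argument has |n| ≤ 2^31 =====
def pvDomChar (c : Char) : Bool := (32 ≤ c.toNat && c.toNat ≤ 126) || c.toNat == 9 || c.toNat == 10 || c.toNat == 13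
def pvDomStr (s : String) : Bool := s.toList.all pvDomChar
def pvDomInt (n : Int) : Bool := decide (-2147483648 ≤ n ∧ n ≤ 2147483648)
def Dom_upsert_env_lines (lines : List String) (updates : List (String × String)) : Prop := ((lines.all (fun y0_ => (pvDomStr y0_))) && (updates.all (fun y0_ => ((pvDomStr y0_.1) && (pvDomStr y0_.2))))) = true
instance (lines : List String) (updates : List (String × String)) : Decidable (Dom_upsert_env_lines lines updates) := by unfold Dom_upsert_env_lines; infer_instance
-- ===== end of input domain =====

-- B replaces A's per-line scan over the dict of still-pending keys by parsing the name before
-- the first '=' once and doing a single direct lookup.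

-- ===== PORT A =====
-- shared helper: Source A and Source B define the identical env_quote
def env_quote (value : String) : String :=
  let escaped := PySem.Str.replace (PySem.Str.replace (PySem.Str.replace
      (PySem.Str.replace value "\\" "\\\\") "\"" "\\\"") "\n" "\\n") "\r" "\\r"
  "\"" ++ escaped ++ "\""

-- shared helper: the trailing-newline patch, textually identical in Source A and Source B
-- ('if output and not output[-1].endswith("\n"): output[-1] += "\n"')
def fixTrailing (output : List String) : List String :=
  match output.getLast? with
  | some last => if PySem.Str.endswith last "\n" then output else output.dropLast ++ [last ++ "\n"]
  | none => output

-- body of A's 'for line in lines' loop; state = (remaining, output)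
def upsertStepA (st : PySem.Dict String String × List String) (line : String) :
    PySem.Dict String String × List String :=
  let stripped := PySem.Str.lstrip line
  match st.1.keys.find? (fun key => PySem.Str.startswith stripped (key ++ "=")) with
  | some key =>
      match st.1.pop? key with
      | some (v, rem) =>
          let indent := PySem.Str.slice line none (some (PySem.Str.len line - PySem.Str.len stripped))
          (rem, st.2 ++ [indent ++ key ++ "=" ++ env_quote v ++ "\n"])
      | none => (st.1, st.2 ++ [line])
  | none => (st.1, st.2 ++ [line])

def upsert_env_lines (lines : List String) (updates : List (String × String)) : List String :=
  let st := lines.foldl upsertStepA (PySem.Dict.ofList updates, [])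
  let output := fixTrailing st.2
  st.1.items.foldl (fun acc kv => acc ++ [kv.1 ++ "=" ++ env_quote kv.2 ++ "\n"]) output

-- ===== PORT B =====
-- body of B's loop; state = (seen, out); dU is Source B's dict parameter 'updates'
-- (the association-list argument as the Python dict it denotes)
def upsertStepB (dU : PySem.Dict String String) (st : PySem.Set String × List String)
    (line : String) : PySem.Set String × List String :=
  let stripped := PySem.Str.lstrip line
  let i := PySem.Str.find stripped "="
  if 0 ≤ i then
    let name := PySem.Str.slice stripped none (some i)
    if dU.contains name && !(PySem.Set.contains st.1 name) then
      let indent := PySem.Str.slice line none (some (PySem.Str.len line - PySem.Str.len stripped))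
      let v := (dU.get? name).getD ""  -- 'updates[name]', guarded by the membership test: never the default
      (PySem.Set.add st.1 name, st.2 ++ [indent ++ name ++ "=" ++ env_quote v ++ "\n"])
    else (st.1, st.2 ++ [line])
  else (st.1, st.2 ++ [line])

def upsert_env_lines_alt (lines : List String) (updates : List (String × String)) : List String :=
  let dU := PySem.Dict.ofList updates
  let st := lines.foldl (upsertStepB dU) (PySem.Set.empty, [])
  let out := fixTrailing st.2
  dU.items.foldl
    (fun acc kv => if !(PySem.Set.contains st.1 kv.1) then acc ++ [kv.1 ++ "=" ++ env_quote kv.2 ++ "\n"] else acc)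
    out

-- ===== PRECONDITION & SPEC =====
-- Pre_ excludes only inputs where an update key CONTAINING '=' (not an env-var name)
-- prefix-matches some line as "key=": there A rewrites the line under that longer key while
-- B resolves the line to the name before its first '='; keys with '=' that never match stay inside Pre_.
def Pre_upsert_env_lines (lines : List String) (updates : List (String × String)) : Prop :=
  ∀ p ∈ updates, '=' ∈ p.1.toList →
    ∀ line ∈ lines, PySem.Str.startswith (PySem.Str.lstrip line) (p.1 ++ "=") = false
instance (lines : List String) (updates : List (String × String)) : Decidable (Pre_upsert_env_lines lines updates) := by unfold Pre_upsert_env_lines; infer_instance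
def pvWitness_upsert_env_lines : List String × (List (String × String)) :=
  (["FOO=1\n", "# comment", "  BAR=old\n"], [("FOO", "new"), ("BAZ", "x")])

def Spec_upsert_env_lines (lines : List String) (updates : List (String × String)) (out : List String) : Prop := out = upsert_env_lines_alt lines updates
instance (lines : List String) (updates : List (String × String)) (out : List String) : Decidable (Spec_upsert_env_lines lines updates out) := by unfold Spec_upsert_env_lines; infer_instance

-- ===== CLAIM (what is proved, stated in full; the proofs are below) =====
def Claim_equal_upsert_env_lines : Prop := ∀ (lines : List String) (updates : List (String × String)), Dom_upsert_env_lines lines updates → Pre_upsert_env_lines lines updates → Spec_upsert_env_lines lines updates (upsert_env_lines lines updates)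

-- ===== LEMMAS AND PROOFS =====

lemma find?_pointwise {α : Type} (l : List α) (p q : α → Bool) (h : ∀ x ∈ l, p x = q x) :
    l.find? p = l.find? q := by
  induction l with
  | nil => rfl
  | cons a t ih =>
      have ha := h a (by simp)
      simp only [List.find?_cons, ← ha]
      cases hp : p a with
      | true => rfl
      | false => exact ih (fun x hx => h x (by simp [hx]))

lemma find?_beq_self (a : String) (l : List String) :
    l.find? (fun k => k == a) = if a ∈ l then some a else none := by
  induction l with
  | nil => simp
  | cons b t ih =>
      by_cases hb : b = a
      · subst hb; simp
      · simp [hb, Ne.symm hb, ih]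

lemma find?_filter {α : Type} (l : List α) (p q : α → Bool)
    (h : ∀ x ∈ l, p x = true → q x = true) : (l.filter q).find? p = l.find? p := by
  induction l with
  | nil => rfl
  | cons a t ih =>
      have ih' := ih (fun x hx => h x (by simp [hx]))
      cases hp : p a with
      | true =>
          have hq := h a (by simp) hp
          simp [List.filter_cons, hq, List.find?_cons, hp]
      | false =>
          by_cases hq : q a = true <;>
            simp [List.filter_cons, hq, List.find?_cons, hp, ih']

lemma prefix_eq_key : ∀ (k s : List Char), '=' ∉ k →
    ((k ++ ['=']) <+: s ↔ ('=' ∈ s ∧ s.takeWhile (fun c => !(c == '=')) = k)) := by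
  intro k
  induction k with
  | nil =>
      intro s _
      cases s with
      | nil => simp
      | cons c t =>
          by_cases hc : c = '='
          · subst hc; simp [List.takeWhile_cons, List.cons_prefix_cons]
          · simp [List.takeWhile_cons, List.cons_prefix_cons, hc, Ne.symm hc]
  | cons a k ih =>
      intro s hk
      have ha : a ≠ '=' := fun h => hk (by simp [h])
      have hk' : '=' ∉ k := fun h => hk (by simp [h])
      cases s with
      | nil => simp
      | cons c t =>
          by_cases hc : c = '='
          · subst hc
            simp [List.cons_append, List.cons_prefix_cons, List.takeWhile_cons, ha]
          · simp [List.cons_append, List.cons_prefix_cons, List.takeWhile_cons, hc,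
                  Ne.symm hc, ih t hk']
            tauto
lemma singleton_prefix_iff (c : Char) (l : List Char) : [c] <+: l ↔ l.head? = some c := by
  cases l with
  | nil => simp
  | cons x t => simp [List.cons_prefix_cons, eq_comm]
lemma find_eq_takeWhile_length (s : List Char) (h : '=' ∈ s) :
    PySem.Chars.find s ['='] = ((s.takeWhile (fun c => !(c == '='))).length : Int) := by
  have h0 : 0 ≤ PySem.Chars.find s ['='] :=
    (PySem.Chars.find_nonneg_iff s ['=']).mpr ((List.singleton_infix_iff '=' s).mpr h)
  obtain ⟨hpre, hmin⟩ := PySem.Chars.find_spec h0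
  set w := s.takeWhile (fun c => !(c == '=')) with hw
  have hsplit : w ++ s.dropWhile (fun c => !(c == '=')) = s := List.takeWhile_append_dropWhile
  have hwne : '=' ∉ w := by
    intro hmem
    have := List.mem_takeWhile_imp hmem
    simp at this
  have hdne : s.dropWhile (fun c => !(c == '=')) ≠ [] := by
    intro hnil
    rw [← hsplit, hnil, List.append_nil] at h
    exact hwne h
  have hdh : (s.dropWhile (fun c => !(c == '='))).head hdne = '=' := by
    have := List.head_dropWhile_not (fun c => !(c == '=')) hdne
    simpa using this
  have hdropw : s.drop w.length = s.dropWhile (fun c => !(c == '=')) := by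
    conv_lhs => rw [← hsplit]
    exact List.drop_left
  have hat : [( '=' : Char)] <+: s.drop w.length := by
    rw [singleton_prefix_iff, List.head?_drop, ← List.head?_drop, hdropw,
        List.head?_eq_some_head hdne, hdh]
  have hle : (PySem.Chars.find s ['=']).toNat ≤ w.length := by
    by_contra hlt
    exact (hmin w.length (by omega)) hat
  have htake : s.take w.length = w := by
    have : w <+: s := List.takeWhile_prefix _
    exact (List.prefix_iff_eq_take.mp this).symm
  have hge : w.length ≤ (PySem.Chars.find s ['=']).toNat := by
    by_contra hlt
    push_neg at hlt
    rw [singleton_prefix_iff, List.head?_drop] at hpre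
    have hgetw : s[(PySem.Chars.find s ['=']).toNat]? = w[(PySem.Chars.find s ['=']).toNat]? := by
      rw [← htake, List.getElem?_take_of_lt hlt]
    rw [hgetw] at hpre
    have hmemw : w[(PySem.Chars.find s ['=']).toNat] = '=' := by
      have hg := List.getElem?_eq_getElem (l := w) (i := (PySem.Chars.find s ['=']).toNat) (by omega)
      rw [hg] at hpre
      exact Option.some.inj hpre
    exact hwne (hmemw ▸ List.getElem_mem _)
  omega

lemma contains_add (seen : PySem.Set String) (nm x : String) :
    PySem.Set.contains (PySem.Set.add seen nm) x = ((x == nm) || PySem.Set.contains seen x) := by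
  rw [Bool.eq_iff_iff]
  simp only [Bool.or_eq_true, PySem.Set.contains_iff, PySem.Set.mem_add, beq_iff_eq]
  tauto

lemma step_eq (dU : PySem.Dict String String)
    (d : PySem.Dict String String) (seen : PySem.Set String) (out : List String) (line : String)
    (hkeys : ∀ p ∈ dU.items, '=' ∈ p.1.toList →
      PySem.Str.startswith (PySem.Str.lstrip line) (p.1 ++ "=") = false)
    (h : d.items = dU.items.filter (fun p => !(PySem.Set.contains seen p.1))) :
    (upsertStepA (d, out) line).2 = (upsertStepB dU (seen, out) line).2
    ∧ (upsertStepA (d, out) line).1.items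
        = dU.items.filter (fun p => !(PySem.Set.contains (upsertStepB dU (seen, out) line).1 p.1)) := by
  have hkeysub : ∀ key ∈ d.keys, ∃ p ∈ dU.items, p.1 = key ∧ PySem.Set.contains seen key = false := by
    intro key hkey
    simp only [PySem.Dict.keys, h, List.mem_map, List.mem_filter] at hkey
    obtain ⟨p, ⟨hp, hq⟩, hfst⟩ := hkey
    exact ⟨p, hp, hfst, by rw [← hfst]; simpa using hq⟩
  set stripped := PySem.Str.lstrip line with hstr
  set s := stripped.toList with hs
  have hfind : PySem.Str.find stripped "=" = PySem.Chars.find s ['='] := by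
    rw [PySem.Str.find_eq]; rfl
  by_cases hm : '=' ∈ s
  · -- a '=' exists on the line
    set w := s.takeWhile (fun c => !(c == '=')) with hw
    have hiw : PySem.Chars.find s ['='] = (w.length : Int) := find_eq_takeWhile_length s hm
    have htake : s.take w.length = w :=
      (List.prefix_iff_eq_take.mp (List.takeWhile_prefix _)).symm
    set nm := PySem.Str.slice stripped none (some (PySem.Str.find stripped "=")) with hnm
    have hnml : nm.toList = w := by
      rw [hnm, PySem.Str.toList_slice, hfind, hiw, PySem.Chars.slice_eq_listSlice,
          PySem.List.slice_to _ (by positivity), Int.toNat_natCast, ← hs, htake]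
    have hwnoeq : '=' ∉ w := fun hmem => by simpa using List.mem_takeWhile_imp hmem
    have hpred : ∀ key ∈ d.keys,
        (PySem.Str.startswith stripped (key ++ "=")) = (key == nm) := by
      intro key hkey
      obtain ⟨p, hp, hfst, hseen⟩ := hkeysub key hkey
      by_cases hkeq : '=' ∈ key.toList
      · -- a key containing '=' never matches (Pre_) and is never B's name
        have hsw : PySem.Str.startswith stripped (key ++ "=") = false :=
          hstr ▸ (hfst ▸ hkeys p hp (hfst ▸ hkeq))
        have hne : (key == nm) = false := by
          rw [beq_eq_false_iff_ne]
          intro hcontra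
          rw [hcontra] at hkeq
          rw [hnml] at hkeq
          exact hwnoeq hkeq
        rw [hsw, hne]
      · rw [Bool.eq_iff_iff, PySem.Str.startswith_eq, PySem.Chars.startswith_iff, beq_iff_eq]
        have hto : (key ++ "=").toList = key.toList ++ ['='] := by simp
        rw [hto, ← hs, prefix_eq_key _ _ hkeq]
        constructor
        · rintro ⟨_, htw⟩
          apply String.toList_inj.mp
          rw [hnml, ← htw]
        · intro hkeq'
          exact ⟨hm, by rw [hkeq', hnml]⟩
    have hfq := find?_pointwise d.keys _ _ hpred
    have hmemiff : nm ∈ d.keys ↔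
        (dU.contains nm = true ∧ PySem.Set.contains seen nm = false) := by
      rw [PySem.Dict.contains_iff_mem_keys]
      simp only [PySem.Dict.keys, h, List.mem_map, List.mem_filter]
      constructor
      · rintro ⟨p, ⟨hp, hq⟩, hfst⟩
        refine ⟨⟨p, hp, hfst⟩, ?_⟩
        rw [← hfst]
        simpa using hq
      · rintro ⟨⟨p, hp, hfst⟩, hc⟩
        refine ⟨p, ⟨hp, ?_⟩, hfst⟩
        rw [hfst, hc]
        rfl
    have hge : (0:Int) ≤ PySem.Str.find stripped "=" := by rw [hfind, hiw]; positivity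
    by_cases hin : nm ∈ d.keys
    · obtain ⟨hcont, hseen⟩ := hmemiff.mp hin
      have hgf : d.items.find? (fun p => p.1 == nm) = dU.items.find? (fun p => p.1 == nm) := by
        rw [h]
        exact find?_filter _ _ _ (fun p _ hp => by
          simp only [beq_iff_eq] at hp
          rw [hp, hseen]
          rfl)
      have hsome : (dU.items.find? (fun p => p.1 == nm)).isSome = true := by
        have := (PySem.Dict.contains_eq_isSome_get? dU nm) ▸ hcont
        simpa [PySem.Dict.get?] using this
      obtain ⟨p0, hp0⟩ := Option.isSome_iff_exists.mp hsome
      have hget : d.get? nm = some p0.2 := by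
        simp only [PySem.Dict.get?, hgf, hp0, Option.map_some]
      have hpop : d.pop? nm = some (p0.2, d.erase nm) := by
        simp only [PySem.Dict.pop?, hget, Option.map_some]
      have hBval : (dU.get? nm).getD "" = p0.2 := by
        simp only [PySem.Dict.get?, hp0, Option.map_some, Option.getD_some]
      have hfq' : d.keys.find? (fun key => PySem.Str.startswith stripped (key ++ "=")) = some nm := by
        rw [hfq, find?_beq_self, if_pos hin]
      have hAeq : upsertStepA (d, out) line
          = (d.erase nm, out ++ [PySem.Str.slice line none (some (PySem.Str.len line - PySem.Str.len stripped))
              ++ nm ++ "=" ++ env_quote p0.2 ++ "\n"]) := by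
        simp only [upsertStepA, ← hstr, hfq', hpop]
      have hBeq : upsertStepB dU (seen, out) line
          = (PySem.Set.add seen nm, out ++ [PySem.Str.slice line none (some (PySem.Str.len line - PySem.Str.len stripped))
              ++ nm ++ "=" ++ env_quote p0.2 ++ "\n"]) := by
        simp only [upsertStepB, ← hstr, ← hnm, if_pos hge, hcont, hseen, hBval,
          Bool.not_false, Bool.and_self, if_true]
      rw [hAeq, hBeq]
      refine ⟨rfl, ?_⟩
      simp only [PySem.Dict.erase, h]
      rw [List.filter_filter]
      apply List.filter_congr
      intro p _
      rw [contains_add, Bool.not_or]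
    · have hcond : (dU.contains nm && !(PySem.Set.contains seen nm)) = false := by
        cases hcont : dU.contains nm with
        | false => simp
        | true =>
          cases hc : PySem.Set.contains seen nm with
          | true => simp
          | false => exact absurd (hmemiff.mpr ⟨hcont, hc⟩) hin
      have hfq'' : d.keys.find? (fun key => PySem.Str.startswith stripped (key ++ "=")) = none := by
        rw [hfq, find?_beq_self, if_neg hin]
      have hAeq : upsertStepA (d, out) line = (d, out ++ [line]) := by
        simp only [upsertStepA, ← hstr, hfq'']
      have hBeq : upsertStepB dU (seen, out) line = (seen, out ++ [line]) := by
        simp only [upsertStepB, ← hstr, ← hnm, if_pos hge, hcond, Bool.false_eq_true, if_false]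
      rw [hAeq, hBeq]
      exact ⟨rfl, h⟩
  · -- no '=' on the line: both keep it
    have hneg : PySem.Chars.find s ['='] = -1 :=
      (PySem.Chars.find_eq_neg_one_iff s ['=']).mpr
        (fun hinf => hm ((List.singleton_infix_iff '=' s).mp hinf))
    have hnone : d.keys.find? (fun key => PySem.Str.startswith stripped (key ++ "=")) = none := by
      rw [List.find?_eq_none]
      intro key hkey hsw
      obtain ⟨p, hp, hfst, _⟩ := hkeysub key hkey
      by_cases hkeq : '=' ∈ key.toList
      · have hfalse : PySem.Str.startswith stripped (key ++ "=") = false :=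
          hstr ▸ (hfst ▸ hkeys p hp (hfst ▸ hkeq))
        rw [hfalse] at hsw
        exact absurd hsw (by simp)
      · rw [PySem.Str.startswith_eq, PySem.Chars.startswith_iff] at hsw
        have hto : (key ++ "=").toList = key.toList ++ ['='] := by simp
        rw [hto, ← hs, prefix_eq_key _ _ hkeq] at hsw
        exact hm hsw.1
    have hAeq : upsertStepA (d, out) line = (d, out ++ [line]) := by
      simp only [upsertStepA, ← hstr, hnone]
    have hBeq : upsertStepB dU (seen, out) line = (seen, out ++ [line]) := by
      simp only [upsertStepB, ← hstr, hfind, hneg]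
      norm_num
    rw [hAeq, hBeq]
    exact ⟨rfl, h⟩

-- main loop: equal outputs and the invariant, along the whole fold
lemma loop_eq (dU : PySem.Dict String String) :
    ∀ (lines : List String), (∀ line ∈ lines, ∀ p ∈ dU.items, '=' ∈ p.1.toList →
      PySem.Str.startswith (PySem.Str.lstrip line) (p.1 ++ "=") = false) →
    ∀ (d : PySem.Dict String String) (seen : PySem.Set String)
      (out : List String),
      d.items = dU.items.filter (fun p => !(PySem.Set.contains seen p.1)) →
      (lines.foldl upsertStepA (d, out)).2 = (lines.foldl (upsertStepB dU) (seen, out)).2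
      ∧ (lines.foldl upsertStepA (d, out)).1.items
          = dU.items.filter (fun p =>
              !(PySem.Set.contains (lines.foldl (upsertStepB dU) (seen, out)).1 p.1)) := by
  intro lines
  induction lines with
  | nil => intro _ d seen out h; simpa using h
  | cons line rest ih =>
      intro hkeys d seen out h
      have ih := ih (fun l hl => hkeys l (List.mem_cons_of_mem _ hl))
      obtain ⟨h2, h1⟩ := step_eq dU d seen out line
        (fun p hp he => hkeys line List.mem_cons_self p hp he) h
      rcases hA : upsertStepA (d, out) line with ⟨d', oA⟩
      rcases hB : upsertStepB dU (seen, out) line with ⟨seen', oB⟩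
      rw [hA, hB] at h1 h2
      simp only at h1 h2
      simp only [List.foldl_cons, hA, hB]
      rw [← h2]
      exact ih d' seen' oA h1

-- nothing is in 'seen' at the start
lemma init_items (d : PySem.Dict String String) :
    d.items = d.items.filter (fun p => !(PySem.Set.contains PySem.Set.empty p.1)) := by
  simp [PySem.Set.contains, PySem.Set.empty]

-- Pre_ transfers from the updates list to the items of the dict built from it
lemma keys_hyp (lines : List String) (updates : List (String × String))
    (hpre : Pre_upsert_env_lines lines updates) :
    ∀ line ∈ lines, ∀ p ∈ (PySem.Dict.ofList updates).items, '=' ∈ p.1.toList →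
      PySem.Str.startswith (PySem.Str.lstrip line) (p.1 ++ "=") = false := by
  intro line hl p hp he
  have hk : p.1 ∈ (PySem.Dict.ofList updates).keys := PySem.Dict.mem_keys_of_mem_items _ hp
  have hkeq : (PySem.Dict.ofList updates).keys
      = PySem.Set.update PySem.Dict.empty.keys (updates.map Prod.fst) :=
    PySem.Dict.keys_foldl_insert_key updates Prod.fst _ _
  rw [hkeq] at hk
  simp only [PySem.Set.mem_update, List.mem_map] at hk
  rcases hk with hk | ⟨q, hq, hfst⟩
  · simp [PySem.Dict.empty, PySem.Dict.keys] at hk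
  · exact hfst ▸ hpre q hq (hfst ▸ he) line hl

-- ===== VERDICT (by name: the statement is the Claim_ definition above) =====
theorem upsert_env_lines_spec : Claim_equal_upsert_env_lines := by
  intro lines updates _ hpre
  unfold Spec_upsert_env_lines
  obtain ⟨h2, h1⟩ := loop_eq (PySem.Dict.ofList updates) lines (keys_hyp lines updates hpre)
      (PySem.Dict.ofList updates) PySem.Set.empty [] (init_items _)
  simp only [upsert_env_lines, upsert_env_lines_alt]
  rw [h1, h2,
      PySem.List.foldl_append_singleton_eq_map
        (f := fun kv : String × String => kv.1 ++ "=" ++ env_quote kv.2 ++ "\n"),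
      PySem.List.foldl_append_if
        (p := fun kv : String × String =>
          !(PySem.Set.contains (lines.foldl (upsertStepB (PySem.Dict.ofList updates)) (PySem.Set.empty, [])).1 kv.1))
        (f := fun kv : String × String => kv.1 ++ "=" ++ env_quote kv.2 ++ "\n")]
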